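-- pv_equiv track=rewrite | github.com/dron-dronych/python-algorithms | last_digit_sum_fibonacci_numbers.py | last_digit_sum_fibonacci_numbers
-- ===== SOURCE A (Python) =====
-- def last_digit_sum_fibonacci_numbers(n):
--
--     # calculate the last digit by finding the remainders of the
--     # sum of Fibonacci sequence elements after dividing
--     # by 10 and then w/ the help of periodicity
--     # of the remainder function obtain a fast solution
--
--     seq, mod_seq = [0, 1], [0, 1]
--
--     if n == 0 or n == 1:
--         return seq[0] if n == 0 else seq[1]
--
--     # determining periodicity of Fib(n) % 10
--     i = 2
--     occurrence_count = 1
--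
--     while occurrence_count <= 1:
--
--         fib_i = seq[i - 2] + seq[i - 1]
--         seq.append(fib_i)
--
--         mod_seq.append(fib_i % 10)
--
--         i += 1
--
--         if mod_seq[i - 2] == 0 and mod_seq[i - 1] == 1:
--             occurrence_count += 1
--
--     period_len = len(mod_seq[:-2])
--     remainder = n % period_len
--
--     # determining the actual remainder w/
--     # the help of calculated remainder
--     seq = [0, 1]
--
--     if remainder == 0 or remainder == 1:
--         return seq[0] if remainder == 0 else seq[1]
--
--     for i in range(2, n + 3):
--         fib_i = seq[i - 2] + seq[i - 1]
--         seq.append(fib_i)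
--
--     return (seq[-1] - 1) % 10
-- ===== SOURCE B (Python) =====
-- def last_digit_sum_fibonacci_numbers(n):
--     # sum of F(0..n) = F(n+2) - 1; F mod 10 has Pisano period 60,
--     # so only F((n % 60) + 2) mod 10 is needed.
--     r = n % 60
--     a, b = 0, 1
--     for _ in range(r + 2):
--         a, b = b, (a + b) % 10
--     return (a - 1) % 10
-- ===== Notes on version B (the rewrite author's own statement) =====
-- stated objective: alternative
-- what changed: B replaces A's big-integer Fibonacci loop over the whole index range (and A's runtime rediscovery of the Pisano period) by a constant-size loop of single-digit Fibonacci steps over one residue of the index modulo the period.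
-- outside the precondition, e.g. on last_digit_sum_fibonacci_numbers(-2): A returns 0, B returns 9
import Mathlib
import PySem

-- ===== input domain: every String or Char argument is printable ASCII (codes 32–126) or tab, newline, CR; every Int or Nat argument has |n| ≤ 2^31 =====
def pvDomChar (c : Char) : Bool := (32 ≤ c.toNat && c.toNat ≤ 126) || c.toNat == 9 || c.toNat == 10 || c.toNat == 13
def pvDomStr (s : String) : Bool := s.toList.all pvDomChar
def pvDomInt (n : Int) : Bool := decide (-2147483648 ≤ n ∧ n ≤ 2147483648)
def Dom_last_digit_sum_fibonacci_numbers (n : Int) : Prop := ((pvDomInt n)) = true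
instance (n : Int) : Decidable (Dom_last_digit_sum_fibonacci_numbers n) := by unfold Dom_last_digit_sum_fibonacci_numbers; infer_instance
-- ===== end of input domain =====

-- B replaces A's big-integer Fibonacci loop by a constant-size single-digit loop
-- over one Pisano period of Fibonacci mod ten (objective: alternative).

-- ===== PORT A =====
-- the 'while occurrence_count <= 1' loop; the fuel argument only makes the same
-- computation total (the loop always stops well within the supplied fuel)
def pvAWhile : Nat → List Int → List Int → Int → Int → (List Int × List Int × Int × Int)
  | 0, seq, ms, i, occ => (seq, ms, i, occ)
  | fuel + 1, seq, ms, i, occ =>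
    if occ ≤ 1 then
      let fib_i := PySem.List.pyGetD seq (i - 2) 0 + PySem.List.pyGetD seq (i - 1) 0
      let seq' := seq ++ [fib_i]
      let ms' := ms ++ [PySem.Int.mod fib_i 10]
      let i' := i + 1
      let occ' := if PySem.List.pyGetD ms' (i' - 2) 0 = 0 ∧ PySem.List.pyGetD ms' (i' - 1) 0 = 1
                  then occ + 1 else occ
      pvAWhile fuel seq' ms' i' occ'
    else (seq, ms, i, occ)

def last_digit_sum_fibonacci_numbers (n : Int) : Int :=
  let seq : List Int := [0, 1]
  if n = 0 ∨ n = 1 then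
    (if n = 0 then PySem.List.pyGetD seq 0 0 else PySem.List.pyGetD seq 1 0)
  else
    let st := pvAWhile 100 seq [0, 1] 2 1
    let mod_seq := st.2.1
    let period_len : Int := ((PySem.List.slice mod_seq none (some (-2))).length : Int)
    let remainder := PySem.Int.mod n period_len
    let seq2 : List Int := [0, 1]
    if remainder = 0 ∨ remainder = 1 then
      (if remainder = 0 then PySem.List.pyGetD seq2 0 0 else PySem.List.pyGetD seq2 1 0)
    else
      let seq3 := (PySem.List.pyRange 2 (n + 3) 1).foldl
        (fun s i => s ++ [PySem.List.pyGetD s (i - 2) 0 + PySem.List.pyGetD s (i - 1) 0]) seq2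
      PySem.Int.mod (PySem.List.pyGetD seq3 (-1) 0 - 1) 10

-- ===== PORT B =====
def last_digit_sum_fibonacci_numbers_alt (n : Int) : Int :=
  let r := PySem.Int.mod n 60
  let ab := (PySem.List.pyRange 0 (r + 2) 1).foldl
    (fun (ab : Int × Int) _ => (ab.2, PySem.Int.mod (ab.1 + ab.2) 10)) (0, 1)
  PySem.Int.mod (ab.1 - 1) 10

-- ===== PRECONDITION & SPEC =====
-- Pre_ requires 0 ≤ n: the argument counts Fibonacci numbers, so a negative
-- argument lies outside the function's natural domain and no particular value is
-- specified there; each program does its own natural thing on such inputs.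
def Pre_last_digit_sum_fibonacci_numbers (n : Int) : Prop := 0 ≤ n
instance (n : Int) : Decidable (Pre_last_digit_sum_fibonacci_numbers n) := by
  unfold Pre_last_digit_sum_fibonacci_numbers; infer_instance

def pvWitness_last_digit_sum_fibonacci_numbers : Int := 7

def Spec_last_digit_sum_fibonacci_numbers (n : Int) (out : Int) : Prop :=
  out = last_digit_sum_fibonacci_numbers_alt n
instance (n : Int) (out : Int) : Decidable (Spec_last_digit_sum_fibonacci_numbers n out) := by
  unfold Spec_last_digit_sum_fibonacci_numbers; infer_instance

-- ===== CLAIM (what is proved, stated in full; the proofs are below) =====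
def Claim_equal_last_digit_sum_fibonacci_numbers : Prop :=
  ∀ (n : Int), Dom_last_digit_sum_fibonacci_numbers n →
    Pre_last_digit_sum_fibonacci_numbers n →
    Spec_last_digit_sum_fibonacci_numbers n (last_digit_sum_fibonacci_numbers n)

-- ===== LEMMAS AND PROOFS =====

-- A's second loop builds the full Fibonacci list [F 0, …, F (m+1)]
theorem foldA (m : Nat) :
    (PySem.List.pyRange 2 ((m : Int) + 2) 1).foldl
        (fun s i => s ++ [PySem.List.pyGetD s (i - 2) 0 + PySem.List.pyGetD s (i - 1) 0]) [0, 1]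
      = (List.range (m + 2)).map (fun k => (Nat.fib k : Int)) := by
  induction m with
  | zero =>
    rw [PySem.List.pyRange_one_eq_nil (by norm_num)]
    simp [List.range_succ]
  | succ m ih =>
    have h1 : ((m + 1 : Nat) : Int) + 2 = ((m : Int) + 2) + 1 := by push_cast; ring
    rw [h1, PySem.List.pyRange_one_succ_right (by omega), List.foldl_append, ih]
    simp only [List.foldl_cons, List.foldl_nil]
    have hg : ∀ (k : Nat), k < m + 2 →
        PySem.List.pyGetD ((List.range (m + 2)).map (fun k => (Nat.fib k : Int))) (k : Int) 0
          = (Nat.fib k : Int) := by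
      intro k hk
      rw [PySem.List.pyGetD_natCast]
      simp [List.getD_eq_getElem?_getD, hk]
    have e2 : (m : Int) + 2 - 2 = ((m : Nat) : Int) := by ring
    have e1 : (m : Int) + 2 - 1 = ((m + 1 : Nat) : Int) := by push_cast; ring
    have hR : (List.range (m + 1 + 2)).map (fun k => (Nat.fib k : Int))
        = (List.range (m + 2)).map (fun k => (Nat.fib k : Int)) ++ [(Nat.fib (m + 2) : Int)] := by
      rw [show m + 1 + 2 = (m + 2) + 1 from by omega, List.range_succ]; simp
    rw [e2, e1, hg m (by omega), hg (m + 1) (by omega), hR]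
    simp [Nat.fib_add_two]

-- B's loop carries the pair (F m % 10, F (m+1) % 10)
theorem foldB (m : Nat) :
    (PySem.List.pyRange 0 (m : Int) 1).foldl
        (fun (ab : Int × Int) _ => (ab.2, PySem.Int.mod (ab.1 + ab.2) 10)) (0, 1)
      = (((Nat.fib m % 10 : Nat) : Int), ((Nat.fib (m + 1) % 10 : Nat) : Int)) := by
  induction m with
  | zero => simp [PySem.List.pyRange_one_eq_nil (by norm_num : (0:Int) ≤ 0)]
  | succ m ih =>
    have h1 : ((m + 1 : Nat) : Int) = (m : Int) + 1 := by push_cast; ring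
    rw [h1, PySem.List.pyRange_one_succ_right (by omega), List.foldl_append, ih]
    simp only [List.foldl_cons, List.foldl_nil]
    rw [PySem.Int.mod_eq_emod_of_pos (by norm_num)]
    refine Prod.ext rfl ?_
    have hfib : Nat.fib (m + 1 + 1) % 10 = (Nat.fib m % 10 + Nat.fib (m + 1) % 10) % 10 := by
      rw [Nat.fib_add_two]; omega
    show _ = ((Nat.fib (m + 1 + 1) % 10 : Nat) : Int)
    rw [hfib]
    push_cast
    simp

-- Pisano period of the Fibonacci sequence mod 10 is 60
theorem fib60 (k : Nat) : Nat.fib (k + 60) % 10 = Nat.fib k % 10 := by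
  have h59 : Nat.fib 59 % 10 = 1 := by decide
  have h60 : Nat.fib 60 % 10 = 0 := by decide
  have h : k + 60 = k + 59 + 1 := by omega
  rw [h, Nat.fib_add, Nat.add_mod, Nat.mul_mod, Nat.mul_mod (Nat.fib (k+1)), h59, h60]
  omega

theorem fib60q (q k : Nat) : Nat.fib (k + 60 * q) % 10 = Nat.fib k % 10 := by
  induction q with
  | zero => rfl
  | succ q ih =>
    have : k + 60 * (q + 1) = (k + 60 * q) + 60 := by ring
    rw [this, fib60, ih]

theorem fib_mod60 (N : Nat) : Nat.fib (N + 2) % 10 = Nat.fib (N % 60 + 2) % 10 := by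
  have h : N + 2 = (N % 60 + 2) + 60 * (N / 60) := by omega
  rw [h, fib60q]

theorem digit_shift (F : Nat) :
    PySem.Int.mod ((F : Int) - 1) 10 = PySem.Int.mod (((F % 10 : Nat) : Int) - 1) 10 := by
  rw [PySem.Int.mod_eq_emod_of_pos (by norm_num), PySem.Int.mod_eq_emod_of_pos (by norm_num)]
  push_cast
  omega

-- A's rediscovered period length is 60 (a closed computation)
theorem periodA :
    (((PySem.List.slice (pvAWhile 100 [0,1] [0,1] 2 1).2.1 none (some (-2))).length : Nat) : Int) = 60 := by
  decide

theorem altB (N : Nat) : last_digit_sum_fibonacci_numbers_alt (N : Int)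
    = PySem.Int.mod (((Nat.fib (N % 60 + 2) % 10 : Nat) : Int) - 1) 10 := by
  have hr : PySem.Int.mod (N : Int) 60 = ((N % 60 : Nat) : Int) := by
    exact_mod_cast PySem.Int.mod_natCast N 60
  have h2 : ((N % 60 : Nat) : Int) + 2 = ((N % 60 + 2 : Nat) : Int) := by push_cast; ring
  simp only [last_digit_sum_fibonacci_numbers_alt, hr, h2, foldB]

theorem mainA (n : Int) (h : 0 ≤ n) :
    last_digit_sum_fibonacci_numbers n = last_digit_sum_fibonacci_numbers_alt n := by
  obtain ⟨N, rfl⟩ : ∃ N : Nat, n = (N : Int) := ⟨n.toNat, (Int.toNat_of_nonneg h).symm⟩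
  by_cases h01 : (N : Int) = 0 ∨ (N : Int) = 1
  · rcases h01 with h0 | h0
    · have : N = 0 := by exact_mod_cast h0
      subst this; decide
    · have : N = 1 := by exact_mod_cast h0
      subst this; decide
  · simp only [last_digit_sum_fibonacci_numbers, if_neg h01, periodA]
    have hrem : PySem.Int.mod (N : Int) 60 = ((N % 60 : Nat) : Int) := by
      exact_mod_cast PySem.Int.mod_natCast N 60
    rw [hrem, altB]
    split_ifs with hA hB
    · have : N % 60 = 0 := by exact_mod_cast hB
      rw [this]; decide
    · have : N % 60 = 1 := by
        rcases hA with h0 | h1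
        · exact absurd h0 hB
        · exact_mod_cast h1
      rw [this]; decide
    · have hb : ((N : Int) + 3) = (((N + 1 : Nat) : Int) + 2) := by push_cast; ring
      rw [hb, foldA]
      have hsplit : (List.range (N + 1 + 2)).map (fun k => (Nat.fib k : Int))
          = (List.range (N + 2)).map (fun k => (Nat.fib k : Int)) ++ [(Nat.fib (N + 2) : Int)] := by
        rw [show N + 1 + 2 = (N + 2) + 1 from by omega, List.range_succ]; simp
      rw [hsplit, PySem.List.pyGetD_neg_one_append_singleton, digit_shift, fib_mod60]

-- ===== VERDICT (by name: the statement is the Claim_ definition above) =====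
theorem last_digit_sum_fibonacci_numbers_spec : Claim_equal_last_digit_sum_fibonacci_numbers := by
  intro n _ hpre
  exact mainA n hpre
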